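-- pv_equiv track=rewrite | github.com/Overton77/biotech-research-ingestion | src/research/langchain_agent/tools_for_test/financials/edgartools_power_explore.py | parse_csv_args
-- ===== SOURCE A (Python) =====
-- from typing import Iterable, Any
--
-- def parse_csv_args(values: Iterable[str]) -> list[str]:
--     out: list[str] = []
--     for value in values:
--         for part in value.split(","):
--             part = part.strip()
--             if part:
--                 out.append(part)
--     return out
-- ===== SOURCE B (Python) =====
-- def parse_csv_args(values):
--     # One-pass character-level tokenizer: builds each token directly,
--     # dropping leading whitespace and buffering inner whitespace until
--     # a non-space character confirms it, so no split()/strip() calls.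
--     out = []
--     for value in values:
--         cur = ""   # confirmed token content so far (no leading/trailing ws)
--         pend = ""  # whitespace seen after cur, kept only if more content follows
--         for ch in value:
--             if ch == ',':
--                 if cur:
--                     out.append(cur)
--                 cur = ""
--                 pend = ""
--             elif ch in " \t\n\r\v\f":
--                 if cur:
--                     pend = pend + ch
--             else:
--                 cur = cur + pend + ch
--                 pend = ""
--         if cur:
--             out.append(cur)
--     return out
-- ===== Notes on version B (the rewrite author's own statement) =====
-- stated objective: alternative
-- what changed: Replaces the split-then-strip-then-filter pipeline with a single character-level state machine that builds each token in place, dropping leading whitespace and buffering inner whitespace until further content confirms it, with no split() or strip() calls.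
import Mathlib
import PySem

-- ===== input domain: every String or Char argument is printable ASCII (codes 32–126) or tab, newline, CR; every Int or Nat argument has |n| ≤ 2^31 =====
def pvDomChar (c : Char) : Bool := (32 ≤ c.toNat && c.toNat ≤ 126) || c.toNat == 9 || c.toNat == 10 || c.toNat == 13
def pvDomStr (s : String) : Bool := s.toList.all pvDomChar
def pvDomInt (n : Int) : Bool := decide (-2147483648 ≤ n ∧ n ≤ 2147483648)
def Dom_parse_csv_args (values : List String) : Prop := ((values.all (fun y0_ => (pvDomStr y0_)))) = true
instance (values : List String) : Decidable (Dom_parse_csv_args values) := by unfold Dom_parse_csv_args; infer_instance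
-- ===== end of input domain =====

-- B replaces A's split/strip/filter pipeline with a one-pass character-level state machine (objective: alternative).


-- ===== PORT A =====
-- for value in values: for part in value.split(","): part = part.strip(); if part: out.append(part)
def parse_csv_args (values : List String) : List String :=
  values.foldl (fun out value =>
    ((PySem.Str.split? value ",").getD []).foldl (fun out part =>
      let part := PySem.Str.strip part
      if part ≠ "" then out ++ [part] else out) out) []

-- ===== PORT B =====
-- ch in " \t\n\r\v\f"
def pyWsB (c : Char) : Bool :=
  c == ' ' || c == '\t' || c == '\n' || c == '\r' || c == '\x0b' || c == '\x0c'

-- if cur: out.append(cur)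
def pvFlushB (out : List String) (cur : List Char) : List String :=
  if cur ≠ [] then out ++ [String.ofList cur] else out

-- the body of B's inner `for ch in value` loop, state (out, cur, pend)
def pvStepB (st : List String × List Char × List Char) (ch : Char) :
    List String × List Char × List Char :=
  if ch = ',' then (pvFlushB st.1 st.2.1, [], [])
  else if pyWsB ch then (st.1, st.2.1, if st.2.1 ≠ [] then st.2.2 ++ [ch] else st.2.2)
  else (st.1, st.2.1 ++ st.2.2 ++ [ch], [])

def parse_csv_args_alt (values : List String) : List String :=
  values.foldl (fun out value =>
    let st := value.toList.foldl pvStepB (out, [], [])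
    pvFlushB st.1 st.2.1) []

-- ===== PRECONDITION & SPEC =====
def Spec_parse_csv_args (values : List String) (out : List String) : Prop := out = parse_csv_args_alt values
instance (values : List String) (out : List String) : Decidable (Spec_parse_csv_args values out) := by unfold Spec_parse_csv_args; infer_instance

-- ===== CLAIM (what is proved, stated in full; the proofs are below) =====
def Claim_equal_parse_csv_args : Prop := ∀ (values : List String), Dom_parse_csv_args values → Spec_parse_csv_args values (parse_csv_args values)

-- ===== LEMMAS AND PROOFS =====

-- structural comma split (proved equal to PySem.Chars.splitOn · [','])
def mySplit : List Char → List (List Char)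
  | [] => [[]]
  | c :: rest => if c = ',' then [] :: mySplit rest else (mySplit rest).modifyHead (c :: ·)

theorem mySplit_ne_nil (l : List Char) : mySplit l ≠ [] := by
  cases l with
  | nil => simp [mySplit]
  | cons c rest =>
    simp only [mySplit]
    split_ifs
    · simp
    · cases h : mySplit rest with
      | nil => exact absurd h (mySplit_ne_nil rest)
      | cons a t => simp [List.modifyHead]

theorem go_spec (fuel : Nat) : ∀ (l cur : List Char) (accs : List (List Char)),
    l.length ≤ fuel →
    PySem.Chars.splitOn.go [','] fuel l cur accs = accs.reverse ++ (mySplit l).modifyHead (cur.reverse ++ ·) := by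
  induction fuel with
  | zero =>
    intro l cur accs hl
    have : l = [] := List.eq_nil_of_length_eq_zero (Nat.le_zero.mp hl)
    subst this
    simp [PySem.Chars.splitOn.go, mySplit, List.modifyHead]
  | succ fuel ih =>
    intro l cur accs hl
    cases l with
    | nil => simp [PySem.Chars.splitOn.go, mySplit, List.modifyHead]
    | cons c rest =>
      simp only [PySem.Chars.splitOn.go]
      by_cases hc : c = ','
      · subst hc
        have hpre : List.isPrefixOf [','] (',' :: rest) = true := by simp [List.isPrefixOf]
        rw [if_pos hpre]
        have hd : List.drop [','].length (',' :: rest) = rest := rfl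
        simp only [List.length_cons] at hl
        rw [hd, ih rest [] (cur.reverse :: accs) (Nat.le_of_succ_le_succ hl)]
        simp only [mySplit]
        cases h : mySplit rest with
        | nil => exact absurd h (mySplit_ne_nil rest)
        | cons a t => simp [List.modifyHead]
      · have hpre : List.isPrefixOf [','] (c :: rest) = false := by
          simp [List.isPrefixOf]; exact fun h => hc h.symm
        rw [if_neg (by simp [hpre])]
        simp only [List.length_cons] at hl
        rw [ih rest (c :: cur) accs (Nat.le_of_succ_le_succ hl)]
        simp only [mySplit, if_neg hc]
        cases h : mySplit rest with
        | nil => exact absurd h (mySplit_ne_nil rest)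
        | cons a t => simp [List.modifyHead]

theorem splitOn_eq_mySplit (l : List Char) : PySem.Chars.splitOn l [','] = mySplit l := by
  have := go_spec (l.length + 1) l [] [] (Nat.le_succ _)
  simp only [PySem.Chars.splitOn] at *
  rw [this]
  cases h : mySplit l with
  | nil => exact absurd h (mySplit_ne_nil l)
  | cons a t => simp [List.modifyHead]

-- inner loop of A: append-if-nonempty fold is map-strip-then-filter
theorem inner_loop (parts : List String) : ∀ (out : List String),
    parts.foldl (fun out part =>
      let part := PySem.Str.strip part
      if part ≠ "" then out ++ [part] else out) out
    = out ++ (parts.map PySem.Str.strip).filter (fun p => p ≠ "") := by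
  induction parts with
  | nil => simp
  | cons p rest ih =>
    intro out
    simp only [List.foldl_cons, List.map_cons, List.filter_cons]
    by_cases h : PySem.Str.strip p ≠ ""
    · rw [ih]; simp [h]
    · rw [ih]; simp only [ne_eq, Decidable.not_not] at h; simp [h]

def perValue (v : String) : List String :=
  (((PySem.Str.split? v ",").getD []).map PySem.Str.strip).filter (fun p => p ≠ "")

theorem outer_loop (values : List String) : ∀ (out : List String),
    values.foldl (fun out value =>
      ((PySem.Str.split? value ",").getD []).foldl (fun out part =>
        let part := PySem.Str.strip part
        if part ≠ "" then out ++ [part] else out) out) out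
    = out ++ values.flatMap perValue := by
  induction values with
  | nil => simp
  | cons v rest ih =>
    intro out
    simp only [List.foldl_cons, List.flatMap_cons]
    rw [inner_loop, ih, perValue, List.append_assoc]

theorem split?_comma (s : String) :
    (PySem.Str.split? s ",").getD [] = (mySplit s.toList).map String.ofList := by
  simp [PySem.Str.split?, PySem.Chars.split?, splitOn_eq_mySplit]

theorem parse_A_eq (values : List String) : parse_csv_args values = values.flatMap perValue := by
  unfold parse_csv_args
  rw [outer_loop]
  simp

-- ===== B-side characterisation =====

def rstripB (s : List Char) : List Char := (s.reverse.dropWhile pyWsB).reverse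
def stripB (s : List Char) : List Char := rstripB (s.dropWhile pyWsB)

def tokensB (segs : List (List Char)) : List String :=
  (segs.map (fun s => String.ofList (stripB s))).filter (fun p => p ≠ "")

-- the confirmed-token content the machine will hold after the current segment
def firstCur (cur pend : List Char) (s : List Char) : List Char :=
  if stripB s = [] then cur
  else if cur = [] then stripB s
  else cur ++ pend ++ rstripB s

theorem ofList_eq_empty_iff (l : List Char) : String.ofList l = "" ↔ l = [] := by
  constructor
  · intro h
    have := congrArg String.toList h
    simpa using this
  · rintro rfl; rfl

theorem mem_dropWhile_of_not (p : Char → Bool) (l : List Char) (x : Char)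
    (hx : x ∈ l) (hpx : p x = false) : x ∈ l.dropWhile p := by
  induction l with
  | nil => exact absurd hx List.not_mem_nil
  | cons c rest ih =>
    rcases List.mem_cons.mp hx with h | h
    · subst h; simp [List.dropWhile, hpx]
    · by_cases hc : p c
      · simpa [List.dropWhile, hc] using ih h
      · simp [List.dropWhile, hc, List.mem_cons, h]

theorem rstripB_eq_nil_iff (s : List Char) : rstripB s = [] ↔ s.all pyWsB := by
  simp [rstripB, List.dropWhile_eq_nil_iff, List.all_eq_true]

theorem stripB_eq_nil_iff (s : List Char) : stripB s = [] ↔ s.all pyWsB := by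
  simp only [stripB, rstripB_eq_nil_iff]
  simp only [List.all_eq_true]
  constructor
  · intro h x hx
    by_cases hw : pyWsB x
    · exact hw
    · exact h x (mem_dropWhile_of_not _ _ _ hx (by simpa using hw))
  · intro h x hx
    exact h x ((List.dropWhile_sublist _).mem hx)

theorem rstripB_cons_of_notWs (c : Char) (s : List Char) (h : pyWsB c = false) :
    rstripB (c :: s) = c :: rstripB s := by
  simp only [rstripB, List.reverse_cons, List.dropWhile_append]
  split_ifs with he
  · simp only [List.isEmpty_iff] at he
    simp [List.dropWhile, h, he]
  · simp

theorem rstripB_cons_of_ws (c : Char) (s : List Char) (hna : ¬ s.all pyWsB) :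
    rstripB (c :: s) = c :: rstripB s := by
  simp only [rstripB, List.reverse_cons, List.dropWhile_append]
  have hne : (s.reverse.dropWhile pyWsB).isEmpty = false := by
    rw [List.isEmpty_eq_false_iff]
    intro h
    apply hna
    rw [← rstripB_eq_nil_iff]
    simp [rstripB, h]
  rw [if_neg (by simp [hne])]
  simp

theorem stripB_cons_of_ws (c : Char) (s : List Char) (h : pyWsB c = true) :
    stripB (c :: s) = stripB s := by
  simp [stripB, List.dropWhile, h]

theorem stripB_cons_of_notWs (c : Char) (s : List Char) (h : pyWsB c = false) :
    stripB (c :: s) = c :: rstripB s := by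
  simp only [stripB, List.dropWhile, h]
  exact rstripB_cons_of_notWs c s h

-- main loop invariant for B's inner character loop
theorem stepB_main (l : List Char) : ∀ (out : List String) (cur pend : List Char),
    (cur = [] → pend = []) →
    pvFlushB (l.foldl pvStepB (out, cur, pend)).1 (l.foldl pvStepB (out, cur, pend)).2.1
    = pvFlushB out (firstCur cur pend (mySplit l).headI) ++ tokensB (mySplit l).tail := by
  induction l with
  | nil =>
    intro out cur pend _
    simp [mySplit, firstCur, stripB, rstripB, tokensB]
  | cons c rest ih =>
    intro out cur pend hinv
    by_cases hc : c = ','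
    · subst hc
      simp only [List.foldl_cons, pvStepB, reduceIte]
      rw [ih (pvFlushB out cur) [] [] (fun _ => rfl)]
      simp only [mySplit, reduceIte, List.headI, List.tail]
      obtain ⟨h, t, hht⟩ : ∃ h t, mySplit rest = h :: t := by
        cases hmr : mySplit rest with
        | nil => exact absurd hmr (mySplit_ne_nil rest)
        | cons a b => exact ⟨a, b, rfl⟩
      rw [hht]
      simp only [List.headI, List.tail]
      have hfc : firstCur cur pend [] = cur := by
        simp [firstCur, stripB, rstripB]
      rw [hfc]
      have hfc0 : firstCur [] [] h = if stripB h = [] then [] else stripB h := by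
        simp [firstCur]
      rw [hfc0]
      by_cases hsh : stripB h = []
      · simp only [if_pos hsh, pvFlushB, ne_eq, not_true_eq_false, reduceIte, tokensB,
          List.map_cons, List.filter_cons]
        rw [hsh]
        simp [tokensB]
      · simp only [if_neg hsh, tokensB, List.map_cons, List.filter_cons]
        simp only [pvFlushB, ne_eq, hsh]
        simp [ofList_eq_empty_iff, hsh, tokensB]
    · obtain ⟨h, t, hht⟩ : ∃ h t, mySplit rest = h :: t := by
        cases hmr : mySplit rest with
        | nil => exact absurd hmr (mySplit_ne_nil rest)
        | cons a b => exact ⟨a, b, rfl⟩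
      have hms : mySplit (c :: rest) = (c :: h) :: t := by
        simp only [mySplit, if_neg hc, hht, List.modifyHead]
      by_cases hw : pyWsB c
      · -- whitespace character
        simp only [List.foldl_cons, pvStepB, if_neg hc, if_pos hw]
        rw [ih out cur (if cur ≠ [] then pend ++ [c] else pend)
            (fun hcn => by simp [hcn, hinv hcn])]
        rw [hms, hht]
        simp only [List.headI, List.tail]
        congr 2
        -- firstCur cur pend' h = firstCur cur pend (c :: h)
        have hsc : stripB (c :: h) = stripB h := stripB_cons_of_ws c h hw
        by_cases hsh : stripB h = []
        · simp [firstCur, hsh, hsc]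
        · by_cases hcn : cur = []
          · subst hcn
            simp [firstCur, hsh, hsc]
          · have hr : rstripB (c :: h) = c :: rstripB h :=
              rstripB_cons_of_ws c h (by rw [← stripB_eq_nil_iff]; exact hsh)
            simp only [firstCur, hsc, if_neg hsh, hr, ne_eq, hcn, not_false_eq_true,
              reduceIte]
            simp
      · -- ordinary character
        simp only [List.foldl_cons, pvStepB, if_neg hc, if_neg hw]
        rw [ih out (cur ++ pend ++ [c]) [] (fun _ => rfl)]
        rw [hms, hht]
        simp only [List.headI, List.tail]
        congr 2
        -- firstCur (cur++pend++[c]) [] h = firstCur cur pend (c :: h)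
        have hwf : pyWsB c = false := by simpa using hw
        have hsc : stripB (c :: h) = c :: rstripB h := stripB_cons_of_notWs c h hwf
        have hne : stripB (c :: h) ≠ [] := by rw [hsc]; simp
        have hcne : cur ++ pend ++ [c] ≠ [] := by simp
        have hL : firstCur (cur ++ pend ++ [c]) [] h = cur ++ pend ++ [c] ++ rstripB h := by
          by_cases hsh : stripB h = []
          · have : rstripB h = [] := by
              rw [rstripB_eq_nil_iff]
              rw [← stripB_eq_nil_iff]; exact hsh
            simp [firstCur, hsh, hcne, this]
          · simp [firstCur, hsh, hcne]
        rw [hL]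
        by_cases hcn : cur = []
        · have hpn : pend = [] := hinv hcn
          simp [firstCur, hne, hcn, hpn, hsc]
        · simp only [firstCur, if_neg hne, if_neg hcn, hsc]
          simp [rstripB_cons_of_notWs c h hwf]

theorem perValueB (v : String) (out : List String) :
    pvFlushB (v.toList.foldl pvStepB (out, [], [])).1 (v.toList.foldl pvStepB (out, [], [])).2.1
    = out ++ tokensB (mySplit v.toList) := by
  rw [stepB_main v.toList out [] [] (fun _ => rfl)]
  obtain ⟨h, t, hht⟩ : ∃ h t, mySplit v.toList = h :: t := by
    cases hmr : mySplit v.toList with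
    | nil => exact absurd hmr (mySplit_ne_nil _)
    | cons a b => exact ⟨a, b, rfl⟩
  rw [hht]
  simp only [List.headI, List.tail]
  by_cases hsh : stripB h = []
  · simp [firstCur, hsh, pvFlushB, tokensB, ofList_eq_empty_iff]
  · simp [firstCur, hsh, pvFlushB, ofList_eq_empty_iff, tokensB]

theorem parse_B_eq (values : List String) : ∀ (out : List String),
    values.foldl (fun out value =>
      let st := value.toList.foldl pvStepB (out, [], [])
      pvFlushB st.1 st.2.1) out
    = out ++ values.flatMap (fun v => tokensB (mySplit v.toList)) := by
  induction values with
  | nil => simp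
  | cons v rest ih =>
    intro out
    simp only [List.foldl_cons, List.flatMap_cons]
    rw [perValueB, ih, List.append_assoc]

-- stripping agrees with Python's strip on domain characters
theorem pyWsB_eq_isspace (c : Char) (h : pvDomChar c = true) :
    pyWsB c = PySem.Chars.isspace c := by
  have e : ∀ d : Char, (c = d) ↔ c.toNat = d.toNat := by
    intro d
    constructor
    · rintro rfl; rfl
    · intro h; exact Char.ext (UInt32.toNat_inj.mp h)
  simp only [pvDomChar, Bool.or_eq_true, Bool.and_eq_true, decide_eq_true_eq, beq_iff_eq] at h
  have t9 : ('\t' : Char).toNat = 9 := rfl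
  have t10 : ('\n' : Char).toNat = 10 := rfl
  have t13 : ('\r' : Char).toNat = 13 := rfl
  have t11 : ('\x0b' : Char).toNat = 11 := rfl
  have t12 : ('\x0c' : Char).toNat = 12 := rfl
  have t32 : (' ' : Char).toNat = 32 := rfl
  apply Bool.coe_iff_coe.mp
  simp only [pyWsB, PySem.Chars.isspace, Bool.or_eq_true, Bool.and_eq_true, beq_iff_eq,
    decide_eq_true_eq, e, t9, t10, t11, t12, t13, t32]
  omega

theorem dropWhile_congr' (p q : Char → Bool) (l : List Char) (h : ∀ x ∈ l, p x = q x) :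
    l.dropWhile p = l.dropWhile q := by
  induction l with
  | nil => rfl
  | cons c rest ih =>
    cases hq : q c with
    | true => simp [List.dropWhile, h c List.mem_cons_self, hq,
        ih (fun x hx => h x (List.mem_cons_of_mem _ hx))]
    | false => simp [List.dropWhile, h c List.mem_cons_self, hq]

theorem stripB_eq_strip (s : List Char) (h : ∀ c ∈ s, pvDomChar c = true) :
    stripB s = PySem.Chars.strip s := by
  have hws : ∀ c ∈ s, pyWsB c = PySem.Chars.isspace c :=
    fun c hc => pyWsB_eq_isspace c (h c hc)
  simp only [stripB, rstripB, PySem.Chars.strip, PySem.Chars.lstrip, PySem.Chars.rstrip]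
  rw [dropWhile_congr' _ _ s hws]
  congr 1
  apply dropWhile_congr'
  intro x hx
  apply hws
  have hx' := List.mem_reverse.mp hx
  exact (List.dropWhile_sublist _).mem hx'

theorem mySplit_subset (l : List Char) : ∀ s ∈ mySplit l, ∀ c ∈ s, c ∈ l := by
  induction l with
  | nil =>
    intro s hs c hc
    simp [mySplit] at hs
    subst hs
    exact absurd hc List.not_mem_nil
  | cons a rest ih =>
    intro s hs c hc
    by_cases ha : a = ','
    · simp only [mySplit, if_pos ha] at hs
      rcases List.mem_cons.mp hs with h | h
      · subst h; exact absurd hc List.not_mem_nil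
      · exact List.mem_cons_of_mem _ (ih s h c hc)
    · simp only [mySplit, if_neg ha] at hs
      obtain ⟨h, t, hht⟩ : ∃ h t, mySplit rest = h :: t := by
        cases hmr : mySplit rest with
        | nil => exact absurd hmr (mySplit_ne_nil _)
        | cons x y => exact ⟨x, y, rfl⟩
      rw [hht] at hs
      simp only [List.modifyHead] at hs
      rcases List.mem_cons.mp hs with h1 | h1
      · subst h1
        rcases List.mem_cons.mp hc with h2 | h2
        · subst h2; exact List.mem_cons_self
        · exact List.mem_cons_of_mem _ (ih h (by rw [hht]; exact List.mem_cons_self) c h2)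
      · exact List.mem_cons_of_mem _ (ih s (by rw [hht]; exact List.mem_cons_of_mem _ h1) c hc)

theorem strip_ofList (s : List Char) :
    PySem.Str.strip (String.ofList s) = String.ofList (PySem.Chars.strip s) := by
  apply String.toList_inj.mp
  simp [PySem.Str.toList_strip]

theorem tokensB_eq_perValue (v : String) (hdom : pvDomStr v = true) :
    tokensB (mySplit v.toList) = perValue v := by
  unfold perValue
  rw [split?_comma]
  unfold tokensB
  rw [List.map_map]
  congr 1
  apply List.map_congr_left
  intro s hs
  simp only [Function.comp]
  rw [strip_ofList, ← stripB_eq_strip]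
  intro c hc
  have : c ∈ v.toList := mySplit_subset v.toList s hs c hc
  simp only [pvDomStr, List.all_eq_true] at hdom
  exact hdom c this

-- ===== VERDICT (by name: the statement is the Claim_ definition above) =====
theorem parse_csv_args_spec : Claim_equal_parse_csv_args := by
  intro values hdom
  unfold Spec_parse_csv_args parse_csv_args_alt
  rw [parse_A_eq, parse_B_eq]
  simp only [List.nil_append]
  apply List.flatMap_congr
  intro v hv
  rw [tokensB_eq_perValue]
  simp only [Dom_parse_csv_args, List.all_eq_true] at hdom
  exact hdom v hv
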